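-- pv_equiv track=rewrite | github.com/AjithKutty/Tesu-tournament | tournaments/kumpoo-2026/test_schedule_fit.py | group_size_options
-- ===== SOURCE A (Python) =====
-- def group_size_options(n):
--     """Generate reasonable group size splits for n players."""
--     options = []
--     # 2 groups
--     if n >= 4:
--         half = n // 2
--         options.append(sorted([half, n - half], reverse=True))
--     # 3 groups
--     if n >= 6:
--         base = n // 3
--         rem = n % 3
--         gs = [base] * 3
--         for i in range(rem):
--             gs[i] += 1
--         options.append(sorted(gs, reverse=True))
--     # 4 groups
--     if n >= 8:
--         base = n // 4
--         rem = n % 4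
--         gs = [base] * 4
--         for i in range(rem):
--             gs[i] += 1
--         options.append(sorted(gs, reverse=True))
--     return options
-- ===== SOURCE B (Python) =====
-- def group_size_options(n):
--     """Generate reasonable group size splits for n players."""
--     def split(m, k):
--         # peel off the largest remaining group (ceiling of an even share),
--         # then split the rest among the remaining k-1 groups
--         if k == 0:
--             return []
--         g = -(-m // k)
--         return [g] + split(m - g, k - 1)
--     return [split(n, k) for k in (2, 3, 4) if n >= 2 * k]
-- ===== Notes on version B (the rewrite author's own statement) =====
-- stated objective: alternative
-- what changed: Replaces A's per-k divmod/mutate-then-sort blocks with a recursive greedy peel: for each admissible k it repeatedly removes one largest group (the ceiling -(-m//k) of an even share of the remaining players) and recurses on the remainder, so splits come out descending with no remainder bookkeeping, no mutation and no sort.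
import Mathlib
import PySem

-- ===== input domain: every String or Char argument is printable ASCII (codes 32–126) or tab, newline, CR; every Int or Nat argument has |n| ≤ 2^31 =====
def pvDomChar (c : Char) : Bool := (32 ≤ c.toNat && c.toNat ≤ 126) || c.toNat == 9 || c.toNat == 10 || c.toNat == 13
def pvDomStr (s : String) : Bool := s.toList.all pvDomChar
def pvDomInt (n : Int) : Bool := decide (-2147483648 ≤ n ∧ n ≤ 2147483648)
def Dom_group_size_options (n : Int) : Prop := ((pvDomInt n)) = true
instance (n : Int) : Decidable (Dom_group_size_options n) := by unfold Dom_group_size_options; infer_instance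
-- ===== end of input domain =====

-- B replaces A's per-k divmod/mutate/sort blocks with a recursive greedy peel: it
-- repeatedly removes a largest group (ceiling of an even share of what remains) and
-- recurses on the rest; objective: alternative (same cost, different algorithm).

-- ===== PORT A =====
-- gs[i] += 1 : i runs over range(rem) with 0 ≤ i < rem ≤ len(gs), so the index is in
-- range and nonnegative; List.set/getD at i.toNat is exact here.
def group_size_options (n : Int) : List (List Int) :=
  let options : List (List Int) := []
  let options :=
    if n ≥ 4 then
      let half := PySem.Int.floordiv n 2
      options ++ [PySem.List.sorted [half, n - half] (fun x => x) true]
    else options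
  let options :=
    if n ≥ 6 then
      let base := PySem.Int.floordiv n 3
      let rem := PySem.Int.mod n 3
      let gs := List.replicate 3 base
      let gs := (PySem.List.pyRange 0 rem 1).foldl
        (fun g i => g.set i.toNat ((g.getD i.toNat 0) + 1)) gs
      options ++ [PySem.List.sorted gs (fun x => x) true]
    else options
  let options :=
    if n ≥ 8 then
      let base := PySem.Int.floordiv n 4
      let rem := PySem.Int.mod n 4
      let gs := List.replicate 4 base
      let gs := (PySem.List.pyRange 0 rem 1).foldl
        (fun g i => g.set i.toNat ((g.getD i.toNat 0) + 1)) gs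
      options ++ [PySem.List.sorted gs (fun x => x) true]
    else options
  options

-- ===== PORT B =====
-- `-(-m // k)` is ceiling division, ported exactly as -(floordiv (-m) k).
def splitRec : Nat → Int → List Int
  | 0, _ => []
  | k + 1, m =>
      let g := -(PySem.Int.floordiv (-m) ((k : Int) + 1))
      g :: splitRec k (m - g)

def group_size_options_alt (n : Int) : List (List Int) :=
  (([2, 3, 4] : List Int).filter (fun k => decide (n ≥ 2 * k))).map
    (fun k => splitRec k.toNat n)

-- ===== PRECONDITION & SPEC =====
def Spec_group_size_options (n : Int) (out : List (List Int)) : Prop := out = group_size_options_alt n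
instance (n : Int) (out : List (List Int)) : Decidable (Spec_group_size_options n out) := by unfold Spec_group_size_options; infer_instance

-- ===== CLAIM (what is proved, stated in full; the proofs are below) =====
def Claim_equal_group_size_options : Prop := ∀ (n : Int), Dom_group_size_options n → Spec_group_size_options n (group_size_options n)

-- ===== LEMMAS AND PROOFS =====

-- The greedy ceiling-peel of k*q + r (0 ≤ r ≤ k) yields r groups of q+1 then k-r of q.
lemma splitRec_closed (k : Nat) (q r : Int) (h0 : 0 ≤ r) (hk : r ≤ (k : Int)) :
    splitRec k ((k : Int) * q + r)
      = List.replicate r.toNat (q + 1) ++ List.replicate (k - r.toNat) q := by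
  induction k generalizing r with
  | zero =>
    have : r = 0 := by exact_mod_cast le_antisymm hk h0
    simp [splitRec, this]
  | succ k ih =>
    by_cases hr : r = 0
    · subst hr
      have hg : -(PySem.Int.floordiv (-((↑(k + 1) : Int) * q + 0)) ((k : Int) + 1)) = q :=
        (PySem.Int.neg_floordiv_neg_eq_iff_of_pos (by positivity)).mpr
          ⟨by push_cast; nlinarith, by push_cast; nlinarith⟩
      have harg : ((↑(k + 1) : Int) * q + 0) - q = (k : Int) * q + 0 := by push_cast; ring
      simp only [splitRec, hg, harg, ih 0 le_rfl (by exact_mod_cast Nat.cast_nonneg k)]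
      simp [List.replicate_succ]
    · have hr1 : 1 ≤ r := by omega
      have hg : -(PySem.Int.floordiv (-((↑(k + 1) : Int) * q + r)) ((k : Int) + 1)) = q + 1 :=
        (PySem.Int.neg_floordiv_neg_eq_iff_of_pos (by positivity)).mpr
          ⟨by push_cast; nlinarith, by push_cast at hk ⊢; nlinarith⟩
      have harg : ((↑(k + 1) : Int) * q + r) - (q + 1) = (k : Int) * q + (r - 1) := by
        push_cast; ring
      have hih := ih (r - 1) (by omega) (by push_cast at hk ⊢; omega)
      have ht : r.toNat = (r - 1).toNat + 1 := by omega
      have ht2 : k + 1 - ((r - 1).toNat + 1) = k - (r - 1).toNat := by omega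
      simp only [splitRec, hg, harg, hih, ht, ht2, List.replicate_succ, List.cons_append]

-- B's peel of n into k groups, stated via n's quotient and remainder by k.
lemma splitRec_divmod (k : Nat) (n : Int) (hk : 0 < (k : Int)) :
    splitRec k n
      = List.replicate (PySem.Int.mod n k).toNat (PySem.Int.floordiv n k + 1)
          ++ List.replicate (k - (PySem.Int.mod n k).toNat) (PySem.Int.floordiv n k) := by
  have hdm := PySem.Int.floordiv_mul_add_mod n k
  have h0 := PySem.Int.mod_nonneg n hk
  have hlt := PySem.Int.mod_lt n hk
  have hn : n = (k : Int) * PySem.Int.floordiv n k + PySem.Int.mod n k := by linarith [hdm]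
  calc splitRec k n
      = splitRec k ((k : Int) * PySem.Int.floordiv n k + PySem.Int.mod n k) := by rw [← hn]
    _ = _ := splitRec_closed k _ _ h0 (by omega)

-- A's 2-group block in replicate form.
lemma block2_eq (n : Int) (_h : n ≥ 4) :
    PySem.List.sorted [PySem.Int.floordiv n 2, n - PySem.Int.floordiv n 2] (fun x => x) true
      = List.replicate (PySem.Int.mod n 2).toNat (PySem.Int.floordiv n 2 + 1)
          ++ List.replicate (2 - (PySem.Int.mod n 2).toNat) (PySem.Int.floordiv n 2) := by
  have hdm := PySem.Int.floordiv_mul_add_mod n 2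
  have h0 := PySem.Int.mod_nonneg n (show (0:Int) < 2 by norm_num)
  have hlt := PySem.Int.mod_lt n (show (0:Int) < 2 by norm_num)
  set q := PySem.Int.floordiv n 2 with hq
  set r := PySem.Int.mod n 2 with hrr
  have hr : r = 0 ∨ r = 1 := by omega
  rcases hr with hr | hr
  · have h2 : n - q = q := by omega
    rw [hr, h2]
    simpa using PySem.List.sorted_rev_eq_self_of_pairwise [q, q] (fun x => x) (by simp)
  · have h2 : n - q = q + 1 := by omega
    rw [hr, h2]
    have := PySem.List.sorted_rev_eq_of_perm_of_pairwise_gt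
      [q, q + 1] [q + 1, q] (fun x => x) (List.Perm.swap _ _ _) (by simp)
    simpa using this

-- A's 3-group block in replicate form.
lemma block3_eq (n : Int) (_h : n ≥ 6) :
    PySem.List.sorted
      (List.foldl (fun g i => g.set i.toNat ((g.getD i.toNat 0) + 1))
        (List.replicate 3 (PySem.Int.floordiv n 3)) (PySem.List.pyRange 0 (PySem.Int.mod n 3) 1))
      (fun x => x) true
      = List.replicate (PySem.Int.mod n 3).toNat (PySem.Int.floordiv n 3 + 1)
          ++ List.replicate (3 - (PySem.Int.mod n 3).toNat) (PySem.Int.floordiv n 3) := by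
  have h0 := PySem.Int.mod_nonneg n (show (0:Int) < 3 by norm_num)
  have hlt := PySem.Int.mod_lt n (show (0:Int) < 3 by norm_num)
  set q := PySem.Int.floordiv n 3
  set r := PySem.Int.mod n 3 with hrr
  have hr : r = 0 ∨ r = 1 ∨ r = 2 := by omega
  rcases hr with hr | hr | hr <;> rw [hr] <;>
    simp [PySem.List.pyRange, List.replicate, List.range_succ] <;>
    exact PySem.List.sorted_rev_eq_self_of_pairwise _ (fun x => x) (by simp)

-- A's 4-group block in replicate form.
lemma block4_eq (n : Int) (_h : n ≥ 8) :
    PySem.List.sorted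
      (List.foldl (fun g i => g.set i.toNat ((g.getD i.toNat 0) + 1))
        (List.replicate 4 (PySem.Int.floordiv n 4)) (PySem.List.pyRange 0 (PySem.Int.mod n 4) 1))
      (fun x => x) true
      = List.replicate (PySem.Int.mod n 4).toNat (PySem.Int.floordiv n 4 + 1)
          ++ List.replicate (4 - (PySem.Int.mod n 4).toNat) (PySem.Int.floordiv n 4) := by
  have h0 := PySem.Int.mod_nonneg n (show (0:Int) < 4 by norm_num)
  have hlt := PySem.Int.mod_lt n (show (0:Int) < 4 by norm_num)
  set q := PySem.Int.floordiv n 4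
  set r := PySem.Int.mod n 4 with hrr
  have hr : r = 0 ∨ r = 1 ∨ r = 2 ∨ r = 3 := by omega
  rcases hr with hr | hr | hr | hr <;> rw [hr] <;>
    simp [PySem.List.pyRange, List.replicate, List.range_succ] <;>
    exact PySem.List.sorted_rev_eq_self_of_pairwise _ (fun x => x) (by simp)

-- A's k-block equals B's peel, for each k that actually occurs (stated in the
-- `/`/`%` normal form that `simp` produces; `/`,`%` agree with floordiv/mod for a positive divisor).
lemma blockB2 (n : Int) (h : n ≥ 4) :
    PySem.List.sorted [n / 2, n - n / 2] (fun x => x) true = splitRec 2 n := by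
  rw [← PySem.Int.floordiv_eq_ediv_of_pos (show (0:Int) < 2 by norm_num)]
  rw [block2_eq n h, splitRec_divmod 2 n (by norm_num)]; norm_num

lemma blockB3 (n : Int) (h : n ≥ 6) :
    PySem.List.sorted
      (List.foldl (fun g i => g.set i.toNat ((g.getD i.toNat 0) + 1)) [n / 3, n / 3, n / 3]
        (PySem.List.pyRange 0 (n % 3))) (fun x => x) true = splitRec 3 n := by
  rw [← PySem.Int.floordiv_eq_ediv_of_pos (show (0:Int) < 3 by norm_num),
      ← PySem.Int.mod_eq_emod_of_pos (show (0:Int) < 3 by norm_num)]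
  rw [show [PySem.Int.floordiv n 3, PySem.Int.floordiv n 3, PySem.Int.floordiv n 3]
        = List.replicate 3 (PySem.Int.floordiv n 3) from rfl]
  rw [block3_eq n h, splitRec_divmod 3 n (by norm_num)]; norm_num

lemma blockB4 (n : Int) (h : n ≥ 8) :
    PySem.List.sorted
      (List.foldl (fun g i => g.set i.toNat ((g.getD i.toNat 0) + 1)) [n / 4, n / 4, n / 4, n / 4]
        (PySem.List.pyRange 0 (n % 4))) (fun x => x) true = splitRec 4 n := by
  rw [← PySem.Int.floordiv_eq_ediv_of_pos (show (0:Int) < 4 by norm_num),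
      ← PySem.Int.mod_eq_emod_of_pos (show (0:Int) < 4 by norm_num)]
  rw [show [PySem.Int.floordiv n 4, PySem.Int.floordiv n 4, PySem.Int.floordiv n 4,
        PySem.Int.floordiv n 4] = List.replicate 4 (PySem.Int.floordiv n 4) from rfl]
  rw [block4_eq n h, splitRec_divmod 4 n (by norm_num)]; norm_num

-- ===== VERDICT (by name: the statement is the Claim_ definition above) =====
theorem group_size_options_spec : Claim_equal_group_size_options := by
  intro n _
  unfold Spec_group_size_options group_size_options group_size_options_alt
  by_cases h2 : n ≥ 4
  · by_cases h3 : n ≥ 6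
    · by_cases h4 : n ≥ 8
      · simp [if_pos h2, if_pos h3, if_pos h4, List.filter_cons]
        exact ⟨blockB2 n h2, blockB3 n h3, blockB4 n h4⟩
      · simp [if_pos h2, if_pos h3, if_neg h4, List.filter_cons]
        exact ⟨blockB2 n h2, blockB3 n h3⟩
    · have h4 : ¬ n ≥ 8 := by omega
      simp [if_pos h2, if_neg h3, if_neg h4, List.filter_cons]
      exact blockB2 n h2
  · have h3 : ¬ n ≥ 6 := by omega
    have h4 : ¬ n ≥ 8 := by omega
    simp [if_neg h2, if_neg h3, if_neg h4, List.filter_cons]
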